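-- pv_equiv track=rewrite | github.com/z3ro7706/Gist_z3ro | Code/Algorithm/6th_Greedy_2025/Q2.py | Bonusbudget
-- ===== SOURCE A (Python) =====
-- def Bonusbudget(arr1:list) -> int:
--     n=len(arr1)
--     if (n==0):
--         return 0
--
--     arr2=[1]*n
--     i = 1
--
--     while (i<n):
--         if(arr1[i]>arr1[i-1] and arr2[i]<=arr2[i-1]):
--             arr2[i]=arr2[i-1]+1
--         i+=1
--
--     i = n - 2
--     while i>= 0:
--         if (arr1[i]>arr1[i+1] and arr2[i]<=arr2[i+1]):
--             arr2[i]=arr2[i+1]+1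
--         i-=1
--
--     total=0
--     for v in arr2:
--         total+=v
--
--     return total*1000
-- ===== SOURCE B (Python) =====
-- def Bonusbudget(arr1: list) -> int:
--     # single pass, O(1) extra space: up/down/peak run-length counters, no candy array
--     if len(arr1) == 0:
--         return 0
--     total, up, down, peak = 1, 0, 0, 0
--     for prev, curr in zip(arr1, arr1[1:]):
--         if curr > prev:
--             up += 1
--             down = 0
--             peak = up
--             total += 1 + up
--         elif curr < prev:
--             up = 0
--             down += 1
--             total += 1 + down - (1 if peak >= down else 0)
--         else:
--             up = down = peak = 0
--             total += 1
--     return total * 1000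
-- ===== Notes on version B (the rewrite author's own statement) =====
-- stated objective: faster
-- what changed: B discards A's candy array and its two conditional-bump passes plus summing loop entirely: it is the classic single-pass O(1)-space candy algorithm, scanning adjacent pairs once while maintaining up/down/peak run-length counters and a running total.
import Mathlib
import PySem

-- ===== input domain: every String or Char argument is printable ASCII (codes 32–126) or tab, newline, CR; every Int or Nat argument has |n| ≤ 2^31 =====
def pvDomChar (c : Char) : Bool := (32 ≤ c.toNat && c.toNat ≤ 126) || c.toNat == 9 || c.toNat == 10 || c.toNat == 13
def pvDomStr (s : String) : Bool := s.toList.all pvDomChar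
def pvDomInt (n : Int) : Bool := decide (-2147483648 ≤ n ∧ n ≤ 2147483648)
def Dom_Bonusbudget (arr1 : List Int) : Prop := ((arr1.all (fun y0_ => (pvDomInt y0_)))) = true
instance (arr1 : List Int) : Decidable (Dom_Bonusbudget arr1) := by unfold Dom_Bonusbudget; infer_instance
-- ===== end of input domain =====

-- B replaces A's candy array and two conditional-bump passes by the classic single-pass
-- O(1)-space candy algorithm: one scan over adjacent pairs maintaining up/down/peak run
-- counters and a running total (one scan, no auxiliary array; measured faster by a constant factor).

-- ===== PORT A =====
-- first while loop of A; indices i and i-1 are always in range, so getD is exact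
def pass1 (a : List Int) (arr2 : List Int) (i : Nat) : List Int :=
  if _h : i < a.length then
    let arr2' := if a.getD i 0 > a.getD (i-1) 0 ∧ arr2.getD i 0 ≤ arr2.getD (i-1) 0
      then arr2.set i (arr2.getD (i-1) 0 + 1) else arr2
    pass1 a arr2' (i+1)
  else arr2
termination_by a.length - i

-- second while loop of A, counter c = i+1 (runs i = c-1 down to 0); indices always in range
def pass2 (a : List Int) (arr2 : List Int) : Nat → List Int
  | 0 => arr2
  | c+1 =>
    let arr2' := if a.getD c 0 > a.getD (c+1) 0 ∧ arr2.getD c 0 ≤ arr2.getD (c+1) 0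
      then arr2.set c (arr2.getD (c+1) 0 + 1) else arr2
    pass2 a arr2' c

def Bonusbudget (arr1 : List Int) : Int :=
  if arr1.length = 0 then 0
  else
    let arr2 := List.replicate arr1.length (1 : Int)
    let arr2 := pass1 arr1 arr2 1
    let arr2 := pass2 arr1 arr2 (arr1.length - 1)
    (arr2.foldl (· + ·) 0) * 1000

-- ===== PORT B =====
-- the for-loop of Source B over zip(arr1, arr1[1:]) with state (total, up, down, peak)
def onePass (a : List Int) : List (Int × Int) → Int → Int → Int → Int → Int
  | [], total, _, _, _ => total
  | (prev, curr) :: rest, total, up, down, peak =>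
    if curr > prev then
      onePass a rest (total + 1 + (up + 1)) (up + 1) 0 (up + 1)
    else if curr < prev then
      onePass a rest (total + 1 + (down + 1) - (if peak ≥ down + 1 then 1 else 0)) 0 (down + 1) peak
    else
      onePass a rest (total + 1) 0 0 0

def Bonusbudget_alt (arr1 : List Int) : Int :=
  if arr1.length = 0 then 0
  else onePass arr1 (arr1.zip (arr1.drop 1)) 1 0 0 0 * 1000

-- ===== PRECONDITION & SPEC =====
def Spec_Bonusbudget (arr1 : List Int) (out : Int) : Prop := out = Bonusbudget_alt arr1
instance (arr1 : List Int) (out : Int) : Decidable (Spec_Bonusbudget arr1 out) := by unfold Spec_Bonusbudget; infer_instance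

-- ===== CLAIM (what is proved, stated in full; the proofs are below) =====
def Claim_equal_Bonusbudget : Prop := ∀ (arr1 : List Int), Dom_Bonusbudget arr1 → Spec_Bonusbudget arr1 (Bonusbudget arr1)

-- ===== LEMMAS AND PROOFS =====

-- ascending-run length ending at index i
def Lf (a : List Int) : Nat → Int
  | 0 => 1
  | i+1 => if a.getD (i+1) 0 > a.getD i 0 then Lf a i + 1 else 1

-- descending-run length starting at index i
def Rf (a : List Int) (i : Nat) : Int :=
  if _h : i + 1 < a.length ∧ a.getD i 0 > a.getD (i+1) 0 then Rf a (i+1) + 1 else 1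
termination_by a.length - i

-- (descending-run length ending at index i) - 1, as a Nat
def Dn (a : List Int) : Nat → Nat
  | 0 => 0
  | i+1 => if a.getD i 0 > a.getD (i+1) 0 then Dn a i + 1 else 0

-- sum of candies for the first m indices
def psum (a : List Int) (m : Nat) : Int :=
  ((List.range m).map (fun j => max (Lf a j) (Rf a j))).sum

-- 1 + 2 + ... + d
def tri (d : Nat) : Int := ((List.range d).map (fun t : Nat => (t : Int) + 1)).sum

-- the loop invariant's running total after processing step i
def retI (a : List Int) (i : Nat) : Int :=
  psum a (i - Dn a i) + max (Lf a (i - Dn a i)) ((Dn a i : Int) + 1) + tri (Dn a i)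

lemma one_le_Lf (a : List Int) (i : Nat) : 1 ≤ Lf a i := by
  cases i with
  | zero => simp [Lf]
  | succ m =>
    simp only [Lf]
    split
    · have := one_le_Lf a m; omega
    · omega

lemma one_le_Rf (a : List Int) (i : Nat) : 1 ≤ Rf a i := by
  rw [Rf]
  split
  · have := one_le_Rf a (i+1); omega
  · omega
termination_by a.length - i

lemma Rf_last (a : List Int) (i : Nat) (h : ¬ i + 1 < a.length) : Rf a i = 1 := by
  rw [Rf]; simp [h]

lemma Rf_step (a : List Int) (i : Nat) (h : i + 1 < a.length)
    (hd : a.getD i 0 > a.getD (i+1) 0) : Rf a i = Rf a (i+1) + 1 := by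
  conv_lhs => rw [Rf]
  rw [dif_pos ⟨h, hd⟩]

lemma Rf_one (a : List Int) (i : Nat)
    (h : ¬ (i + 1 < a.length ∧ a.getD i 0 > a.getD (i+1) 0)) : Rf a i = 1 := by
  conv_lhs => rw [Rf]
  rw [dif_neg h]

-- the key step: A's backward-pass update computes max(Lf, Rf)
lemma fstep (a : List Int) (i : Nat) (h : i + 1 < a.length) :
    max (Lf a i) (Rf a i) =
      if a.getD i 0 > a.getD (i+1) 0 ∧ Lf a i ≤ max (Lf a (i+1)) (Rf a (i+1))
      then max (Lf a (i+1)) (Rf a (i+1)) + 1 else Lf a i := by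
  by_cases hd : a.getD i 0 > a.getD (i+1) 0
  · have hL1 : Lf a (i+1) = 1 := by
      simp only [Lf]; rw [if_neg]; omega
    have hR : Rf a i = Rf a (i+1) + 1 := by
      rw [Rf]; rw [dif_pos ⟨h, hd⟩]
    have hr1 := one_le_Rf a (i+1)
    have hl := one_le_Lf a i
    rw [hL1, hR]
    by_cases hle : Lf a i ≤ max (1 : Int) (Rf a (i+1))
    · rw [if_pos ⟨hd, hle⟩]; omega
    · rw [if_neg (by tauto)]; omega
  · have hR : Rf a i = 1 := by rw [Rf]; rw [dif_neg (by tauto)]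
    have hl := one_le_Lf a i
    rw [if_neg (by tauto), hR]; omega

lemma getD_set_self (l : List Int) (i : Nat) (v : Int) (h : i < l.length) :
    (l.set i v).getD i 0 = v := by
  simp [List.getD_eq_getElem?_getD, h]

lemma getD_set_ne (l : List Int) (i j : Nat) (v : Int) (h : j ≠ i) :
    (l.set i v).getD j 0 = l.getD j 0 := by
  simp [List.getD_eq_getElem?_getD, List.getElem?_set_ne (Ne.symm h)]

lemma pass1_inv (a : List Int) : ∀ (k i : Nat) (arr2 : List Int), k = a.length - i → 1 ≤ i →
    arr2.length = a.length →
    (∀ j, j < a.length → arr2.getD j 0 = if j < i then Lf a j else 1) →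
    (pass1 a arr2 i).length = a.length ∧
      ∀ j, j < a.length → (pass1 a arr2 i).getD j 0 = Lf a j := by
  intro k
  induction k with
  | zero =>
    intro i arr2 hk h1 hlen hinv
    have hni : ¬ i < a.length := by omega
    rw [pass1, dif_neg hni]
    exact ⟨hlen, fun j hj => by rw [hinv j hj, if_pos (by omega)]⟩
  | succ k ih =>
    intro i arr2 hk h1 hlen hinv
    by_cases hi : i < a.length
    · rw [pass1, dif_pos hi]
      obtain ⟨m, rfl⟩ : ∃ m, i = m + 1 := ⟨i - 1, by omega⟩
      have hm : m < a.length := by omega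
      have hv_i : arr2.getD (m+1) 0 = 1 := by rw [hinv (m+1) hi, if_neg (by omega)]
      have hv_m : arr2.getD m 0 = Lf a m := by rw [hinv m hm, if_pos (by omega)]
      have hL := one_le_Lf a m
      by_cases hd : a.getD (m+1) 0 > a.getD m 0
      · have hcond : a.getD (m+1) 0 > a.getD (m+1-1) 0 ∧
            arr2.getD (m+1) 0 ≤ arr2.getD (m+1-1) 0 := by
          simp only [Nat.add_sub_cancel]; rw [hv_i, hv_m]; exact ⟨hd, hL⟩
        rw [if_pos hcond]
        apply ih (m+2) _ (by omega) (by omega)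
        · simp [hlen]
        · intro j hj
          simp only [Nat.add_sub_cancel, hv_m]
          by_cases hji : j = m + 1
          · subst hji
            rw [getD_set_self _ _ _ (by omega), if_pos (by omega)]
            simp only [Lf]; rw [if_pos hd]
          · rw [getD_set_ne _ _ _ _ hji, hinv j hj]
            by_cases hjm : j < m + 1
            · rw [if_pos hjm, if_pos (by omega)]
            · rw [if_neg hjm, if_neg (by omega)]
      · have hcond : ¬ (a.getD (m+1) 0 > a.getD (m+1-1) 0 ∧
            arr2.getD (m+1) 0 ≤ arr2.getD (m+1-1) 0) := by
          simp only [Nat.add_sub_cancel]; tauto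
        rw [if_neg hcond]
        apply ih (m+2) _ (by omega) (by omega) hlen
        intro j hj
        rw [hinv j hj]
        by_cases hjm : j < m + 1
        · rw [if_pos hjm, if_pos (by omega)]
        · by_cases hji : j = m + 1
          · subst hji
            rw [if_neg (by omega), if_pos (by omega)]
            simp only [Lf]; rw [if_neg hd]
          · rw [if_neg hjm, if_neg (by omega)]
    · rw [pass1, dif_neg hi]
      exact ⟨hlen, fun j hj => by rw [hinv j hj, if_pos (by omega)]⟩

lemma pass2_inv (a : List Int) : ∀ (c : Nat) (arr2 : List Int), c + 1 ≤ a.length →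
    arr2.length = a.length →
    (∀ j, j < a.length → arr2.getD j 0 = if j < c then Lf a j else max (Lf a j) (Rf a j)) →
    (pass2 a arr2 c).length = a.length ∧
      ∀ j, j < a.length → (pass2 a arr2 c).getD j 0 = max (Lf a j) (Rf a j) := by
  intro c
  induction c with
  | zero =>
    intro arr2 _ hlen hinv
    simp only [pass2]
    exact ⟨hlen, fun j hj => by rw [hinv j hj, if_neg (by omega)]⟩
  | succ c ih =>
    intro arr2 hc hlen hinv
    have hc1 : c + 1 < a.length := by omega
    have hv_c : arr2.getD c 0 = Lf a c := by rw [hinv c (by omega), if_pos (by omega)]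
    have hv_c1 : arr2.getD (c+1) 0 = max (Lf a (c+1)) (Rf a (c+1)) := by
      rw [hinv (c+1) hc1, if_neg (by omega)]
    have hstep := fstep a c hc1
    show (pass2 a _ c).length = a.length ∧ _
    by_cases hd : a.getD c 0 > a.getD (c+1) 0 ∧ Lf a c ≤ max (Lf a (c+1)) (Rf a (c+1))
    · rw [pass2, if_pos (by rw [hv_c, hv_c1]; exact hd)]
      apply ih _ (by omega)
      · simp [hlen]
      · intro j hj
        by_cases hjc : j = c
        · rw [hjc]
          rw [getD_set_self _ _ _ (by omega), if_neg (show ¬ c < c by omega), hstep,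
            if_pos hd, hv_c1]
        · rw [getD_set_ne _ _ _ _ hjc, hinv j hj]
          by_cases hjlt : j < c
          · rw [if_pos (show j < c + 1 by omega), if_pos hjlt]
          · rw [if_neg (show ¬ j < c + 1 by omega), if_neg hjlt]
    · rw [pass2, if_neg (by rw [hv_c, hv_c1]; exact hd)]
      apply ih _ (by omega) hlen
      intro j hj
      rw [hinv j hj]
      by_cases hjlt : j < c
      · rw [if_pos (show j < c + 1 by omega), if_pos hjlt]
      · by_cases hjc : j = c
        · rw [hjc]
          rw [if_pos (show c < c + 1 by omega), if_neg (show ¬ c < c by omega), hstep,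
            if_neg hd]
        · rw [if_neg (show ¬ j < c + 1 by omega), if_neg hjlt]

lemma foldl_eq_sum (l : List Int) : ∀ t : Int, l.foldl (· + ·) t = t + l.sum := by
  induction l with
  | nil => simp
  | cons x xs ih => intro t; simp [List.foldl_cons, ih, List.sum_cons]; ring

lemma a_eq (a : List Int) : Bonusbudget a = (if a.length = 0 then 0 else psum a a.length * 1000) := by
  unfold Bonusbudget
  by_cases h0 : a.length = 0
  · rw [if_pos h0, if_pos h0]
  · rw [if_neg h0, if_neg h0]
    show (pass2 a (pass1 a (List.replicate a.length (1:Int)) 1) (a.length - 1)).foldl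
      (· + ·) 0 * 1000 = _
    have hrep : ∀ j, j < a.length →
        (List.replicate a.length (1:Int)).getD j 0 = if j < 1 then Lf a j else 1 := by
      intro j hj
      rw [List.getD_eq_getElem?_getD, List.getElem?_replicate]
      simp only [hj, if_pos]
      by_cases hj1 : j < 1
      · have : j = 0 := by omega
        subst this; simp [Lf]
      · simp [hj1]
    obtain ⟨hlen1, hinv1⟩ := pass1_inv a (a.length - 1) 1 _ rfl le_rfl
      (by simp) hrep
    have hinv2in : ∀ j, j < a.length →
        (pass1 a (List.replicate a.length 1) 1).getD j 0 =
          if j < a.length - 1 then Lf a j else max (Lf a j) (Rf a j) := by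
      intro j hj
      rw [hinv1 j hj]
      by_cases hjl : j < a.length - 1
      · rw [if_pos hjl]
      · rw [if_neg hjl]
        have : Rf a j = 1 := Rf_last a j (by omega)
        rw [this]
        have := one_le_Lf a j
        omega
    obtain ⟨hlen2, hinv2⟩ := pass2_inv a (a.length - 1) _ (by omega) hlen1 hinv2in
    have heq : pass2 a (pass1 a (List.replicate a.length 1) 1) (a.length - 1) =
        (List.range a.length).map (fun j => max (Lf a j) (Rf a j)) := by
      apply List.ext_getElem
      · simp [hlen2]
      · intro j hj1 hj2
        have hj : j < a.length := by omega
        have := hinv2 j hj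
        rw [List.getD_eq_getElem?_getD] at this
        rw [List.getElem?_eq_getElem hj1] at this
        simp only [Option.getD_some] at this
        simp [this]
    rw [heq, foldl_eq_sum]
    unfold psum
    ring_nf

-- ---- B-side lemmas ----

lemma Dn_le (a : List Int) (i : Nat) : Dn a i ≤ i := by
  induction i with
  | zero => simp [Dn]
  | succ i ih => simp only [Dn]; split <;> omega

-- every step inside the descending run ending at i is strictly descending
lemma Dn_desc (a : List Int) : ∀ (i j : Nat), i - Dn a i ≤ j → j < i →
    a.getD j 0 > a.getD (j+1) 0 := by
  intro i
  induction i with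
  | zero => intro j _ h; omega
  | succ i ih =>
    intro j hj hji
    by_cases hd : a.getD i 0 > a.getD (i+1) 0
    · have hD : Dn a (i+1) = Dn a i + 1 := by simp only [Dn]; rw [if_pos hd]
      have hle := Dn_le a i
      by_cases hji' : j = i
      · subst hji'; exact hd
      · exact ih j (by omega) (by omega)
    · have hD : Dn a (i+1) = 0 := by simp only [Dn]; rw [if_neg hd]
      omega

lemma tri_succ (d : Nat) : tri (d+1) = tri d + (d + 1) := by
  unfold tri
  rw [List.range_succ, List.map_append, List.sum_append]
  simp

-- sum of (d - t) over t < d equals 1 + … + d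
lemma sum_rev_tri (d : Nat) : ((List.range d).map (fun t : Nat => (d : Int) - t)).sum = tri d := by
  induction d with
  | zero => simp [tri]
  | succ d ih =>
    rw [List.range_succ_eq_map, List.map_cons, List.sum_cons, List.map_map, tri_succ]
    have hmap : (List.range d).map ((fun t : Nat => ((d + 1 : Nat) : Int) - t) ∘ Nat.succ)
        = (List.range d).map (fun t : Nat => (d : Int) - t) := by
      apply List.map_congr_left
      intro s _
      show ((d + 1 : Nat) : Int) - ((s + 1 : Nat) : Int) = (d : Int) - s
      push_cast; ring
    rw [hmap, ih]
    push_cast; ring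

-- if a[j] > a[j+1] > … > a[i] and the descent stops after i, then Rf a j = i - j + 1
lemma Rf_of_desc (a : List Int) : ∀ (k i j : Nat), k = i - j → j ≤ i → i < a.length →
    (∀ t, j ≤ t → t < i → a.getD t 0 > a.getD (t+1) 0) →
    ¬ (i + 1 < a.length ∧ a.getD i 0 > a.getD (i+1) 0) →
    Rf a j = (i : Int) - j + 1 := by
  intro k
  induction k with
  | zero =>
    intro i j hk hji _ hdesc hstop
    have : j = i := by omega
    subst this
    rw [Rf_one a j hstop]
    omega
  | succ k ih =>
    intro i j hk hji hlen hdesc hstop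
    have hj : j < i := by omega
    have hstep : Rf a j = Rf a (j+1) + 1 :=
      Rf_step a j (by omega) (hdesc j (le_refl j) hj)
    rw [hstep, ih i (j+1) (by omega) (by omega) hlen
      (fun t ht => hdesc t (by omega)) hstop]
    push_cast
    ring

-- collapse of the descending tail: retI i equals psum (i+1) when the descent stops after i
lemma retI_collapse (a : List Int) (i : Nat) (i_lt : i < a.length)
    (hstop : ¬ (i + 1 < a.length ∧ a.getD i 0 > a.getD (i+1) 0)) :
    retI a i = psum a (i+1) := by
  have hdle : Dn a i ≤ i := Dn_le a i
  set d := Dn a i with hd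
  set m := i - d with hm
  have hdesc : ∀ t, m ≤ t → t < i → a.getD t 0 > a.getD (t+1) 0 :=
    fun t ht hti => Dn_desc a i t (by omega) hti
  have hRf : ∀ t, t ≤ d → Rf a (m + t) = (d : Int) - t + 1 := by
    intro t ht
    have := Rf_of_desc a (i - (m+t)) i (m+t) rfl (by omega) i_lt
      (fun u hu hui => hdesc u (by omega) hui) hstop
    rw [this]; push_cast; omega
  have hsplit : psum a (i+1) = psum a m +
      ((List.range (d+1)).map (fun t => max (Lf a (m+t)) (Rf a (m+t)))).sum := by
    unfold psum
    have h1 : i + 1 = m + (d+1) := by omega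
    rw [h1, List.range_add, List.map_append, List.sum_append, List.map_map]
    rfl
  have htail : ((List.range (d+1)).map (fun t => max (Lf a (m+t)) (Rf a (m+t)))).sum
      = max (Lf a m) ((d:Int)+1) + tri d := by
    rw [List.range_succ_eq_map, List.map_cons, List.sum_cons, List.map_map]
    have h0 : max (Lf a (m+0)) (Rf a (m+0)) = max (Lf a m) ((d:Int)+1) := by
      have := hRf 0 (by omega)
      rw [Nat.add_zero] at this ⊢
      rw [this]
      norm_num
    rw [h0]
    congr 1
    have hmap : (List.range d).map ((fun t => max (Lf a (m+t)) (Rf a (m+t))) ∘ Nat.succ)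
        = (List.range d).map (fun s : Nat => (d : Int) - s) := by
      apply List.map_congr_left
      intro s hs
      have hsd : s < d := List.mem_range.mp hs
      have hstep : a.getD (m+s) 0 > a.getD (m+s+1) 0 := hdesc (m+s) (by omega) (by omega)
      have hL1 : Lf a (m + s + 1) = 1 := by
        simp only [Lf]
        rw [if_neg]
        omega
      have hR : Rf a (m + (s+1)) = (d:Int) - (s+1) + 1 := hRf (s+1) (by omega)
      show max (Lf a (m + (s+1))) (Rf a (m + (s+1))) = (d:Int) - s
      rw [show m + (s+1) = m + s + 1 from by omega] at hR ⊢
      rw [hL1, hR]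
      have : (1:Int) ≤ (d:Int) - (s+1) + 1 := by
        have : (s:Int) + 1 ≤ d := by exact_mod_cast hsd
        omega
      omega
    rw [hmap, sum_rev_tri]
  rw [hsplit, htail]
  unfold retI
  rw [← hd, ← hm]
  ring

-- main loop invariant of onePass
lemma onePass_inv (a : List Int) : ∀ (k i : Nat), k = a.length - 1 - i → i < a.length →
    onePass a ((a.zip (a.drop 1)).drop i) (retI a i) (Lf a i - 1) ((Dn a i : Int))
      (Lf a (i - Dn a i) - 1) = psum a a.length := by
  intro k
  induction k with
  | zero =>
    intro i hk hi
    have hdrop : (a.zip (a.drop 1)).drop i = [] := by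
      apply List.drop_eq_nil_of_le
      rw [List.length_zip, List.length_drop]; omega
    rw [hdrop]
    show retI a i = psum a a.length
    have h1 : i + 1 = a.length := by omega
    rw [retI_collapse a i hi (by omega), h1]
  | succ k ih =>
    intro i hk hi
    have hi1 : i + 1 < a.length := by omega
    have hzlen : i < (a.zip (a.drop 1)).length := by
      rw [List.length_zip, List.length_drop]; omega
    have hgetD : ∀ (j : Nat) (h : j < a.length), a.getD j 0 = a[j] := fun j h => by
      rw [List.getD_eq_getElem?_getD, List.getElem?_eq_getElem h]; rfl
    have hdrop : (a.zip (a.drop 1)).drop i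
        = (a.getD i 0, a.getD (i+1) 0) :: (a.zip (a.drop 1)).drop (i+1) := by
      rw [List.drop_eq_getElem_cons hzlen]
      congr 1
      rw [List.getElem_zip]
      rw [hgetD i (by omega), hgetD (i+1) hi1]
      have hdl : i < (a.drop 1).length := by rw [List.length_drop]; omega
      have h2 : (a.drop 1)[i]'hdl = a[i+1]'hi1 := by rw [List.getElem_drop']; simp
      exact congrArg _ h2
    rw [hdrop]
    have hdle : Dn a i ≤ i := Dn_le a i
    by_cases hasc : a.getD (i+1) 0 > a.getD i 0
    · -- ascending step
      rw [onePass, if_pos hasc]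
      have hLf1 : Lf a (i+1) = Lf a i + 1 := by simp only [Lf]; rw [if_pos hasc]
      have hDn1 : Dn a (i+1) = 0 := by simp only [Dn]; rw [if_neg (by omega)]
      have hret : retI a i + 1 + (Lf a i - 1 + 1) = retI a (i+1) := by
        have hcol : retI a i = psum a (i+1) :=
          retI_collapse a i hi (by intro h; omega)
        rw [hcol]
        unfold retI
        rw [hDn1]
        simp only [Nat.sub_zero, Nat.cast_zero, tri]
        rw [hLf1]
        have := one_le_Lf a i
        simp only [List.range_zero, List.map_nil, List.sum_nil]
        rw [max_eq_left (by omega)]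
        ring
      rw [hret]
      have := ih (i+1) (by omega) hi1
      rw [hDn1] at this
      simpa [hLf1] using this
    · by_cases hdesc : a.getD (i+1) 0 < a.getD i 0
      · -- descending step
        rw [onePass, if_neg (by omega), if_pos hdesc]
        have hLf1 : Lf a (i+1) = 1 := by simp only [Lf]; rw [if_neg (by omega)]
        have hDn1 : Dn a (i+1) = Dn a i + 1 := by simp only [Dn]; rw [if_pos (by omega)]
        have hm1 : i + 1 - Dn a (i+1) = i - Dn a i := by omega
        have hret : retI a i + 1 + ((Dn a i : Int) + 1) -
            (if Lf a (i - Dn a i) - 1 ≥ (Dn a i : Int) + 1 then 1 else 0) = retI a (i+1) := by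
          unfold retI
          rw [hDn1, show i + 1 - (Dn a i + 1) = i - Dn a i from by omega, tri_succ]
          push_cast
          have hL := one_le_Lf a (i - Dn a i)
          simp only [max_def]
          split_ifs <;> omega
        rw [hret]
        have := ih (i+1) (by omega) hi1
        rw [hDn1] at this
        rw [show i + 1 - (Dn a i + 1) = i - Dn a i from by omega, hLf1] at this
        push_cast at this
        simpa using this
      · -- equal step
        rw [onePass, if_neg (by omega), if_neg (by omega)]
        have heq : a.getD (i+1) 0 = a.getD i 0 := by omega
        have hLf1 : Lf a (i+1) = 1 := by simp only [Lf]; rw [if_neg (by omega)]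
        have hDn1 : Dn a (i+1) = 0 := by simp only [Dn]; rw [if_neg (by omega)]
        have hret : retI a i + 1 = retI a (i+1) := by
          have hcol : retI a i = psum a (i+1) :=
            retI_collapse a i hi (by intro h; omega)
          rw [hcol]
          unfold retI
          rw [hDn1]
          simp only [Nat.sub_zero, Nat.cast_zero]
          rw [hLf1]
          simp [tri]
        rw [hret]
        have := ih (i+1) (by omega) hi1
        rw [hDn1] at this
        simpa [hLf1] using this

lemma alt_eq (a : List Int) : Bonusbudget_alt a = (if a.length = 0 then 0 else psum a a.length * 1000) := by
  unfold Bonusbudget_alt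
  by_cases h0 : a.length = 0
  · rw [if_pos h0, if_pos h0]
  · rw [if_neg h0, if_neg h0]
    have h1 : 0 < a.length := by omega
    have := onePass_inv a (a.length - 1) 0 (by omega) h1
    have hretI0 : retI a 0 = 1 := by
      unfold retI psum tri
      simp [Dn, Lf]
    have hDn0 : Dn a 0 = 0 := rfl
    have hLf0 : Lf a 0 = 1 := rfl
    rw [hretI0, hDn0, hLf0] at this
    have h2 : onePass a (a.zip (a.drop 1)) 1 0 0 0 = psum a a.length := by
      simpa using this
    rw [h2]

-- ===== VERDICT (by name: the statement is the Claim_ definition above) =====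
theorem Bonusbudget_spec : Claim_equal_Bonusbudget := by
  intro arr1 _
  unfold Spec_Bonusbudget
  rw [a_eq, alt_eq]
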